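-- pv_equiv track=rewrite | github.com/brian-arnold/refactor_lukas_imaging_workflow | package/ZZ_calcium_responseNew.py | ZZ_parse_odor_stringNew
-- ===== SOURCE A (Python) =====
-- from collections import OrderedDict
--
-- def ZZ_parse_odor_stringNew(odor_string, file_ranges, channels):
--     """parse the odor string with the new format, where different odorants may under the same channel
--     odor_string: String, the order of puffs (single odorants or Markes), e.g. (A0)_(B0)_(B0)_(A1)
--     file_ranges: List, what files corresponds to the odor_string, e.g. [2,3,5,6]
--     channels: List, what channels to return results, e.g. ['B0', 'A1']
--     return: OrderedDict, e.g. {'B0':[3, 5], 'A1':[6]} """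
--     info = odor_string.split('_')
--     odor_file = OrderedDict()
--     for channel in channels:
--         file_idx = []
--         for idx, ch in enumerate(info):
--             if ch==f'({channel})':
--                 file_idx.append(file_ranges[idx])
--         odor_file[channel] = file_idx
--     return(odor_file)
-- ===== SOURCE B (Python) =====
-- from collections import OrderedDict
--
-- def ZZ_parse_odor_stringNew(odor_string, file_ranges, channels):
--     # One pass: pair tokens with their file numbers, keep the parenthesized ones,
--     # group by channel name in a dict, then emit in the requested channel order.
--     pairs = [(tok[1:-1], f)
--              for tok, f in zip(odor_string.split('_'), file_ranges)
--              if tok.startswith('(') and tok.endswith(')')]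
--     groups = {}
--     for name, f in pairs:
--         groups.setdefault(name, []).append(f)
--     out = OrderedDict()
--     for c in channels:
--         out[c] = list(groups.get(c, []))
--     return out
-- ===== Notes on version B (the rewrite author's own statement) =====
-- stated objective: alternative
-- what changed: A rescans the whole token list once per channel; B makes a single pass over the zipped (token, file) pairs building a channel->files dict, then emits the requested channels by lookup (asymptotically O(N+C) vs O(C*N), but not measured as faster on the generated inputs, whose channel lists are short).
-- outside the precondition, e.g. on ZZ_parse_odor_stringNew('(A)_(B)', [1], ['B']): A raises IndexError, B returns {'B': []}
import Mathlib
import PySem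

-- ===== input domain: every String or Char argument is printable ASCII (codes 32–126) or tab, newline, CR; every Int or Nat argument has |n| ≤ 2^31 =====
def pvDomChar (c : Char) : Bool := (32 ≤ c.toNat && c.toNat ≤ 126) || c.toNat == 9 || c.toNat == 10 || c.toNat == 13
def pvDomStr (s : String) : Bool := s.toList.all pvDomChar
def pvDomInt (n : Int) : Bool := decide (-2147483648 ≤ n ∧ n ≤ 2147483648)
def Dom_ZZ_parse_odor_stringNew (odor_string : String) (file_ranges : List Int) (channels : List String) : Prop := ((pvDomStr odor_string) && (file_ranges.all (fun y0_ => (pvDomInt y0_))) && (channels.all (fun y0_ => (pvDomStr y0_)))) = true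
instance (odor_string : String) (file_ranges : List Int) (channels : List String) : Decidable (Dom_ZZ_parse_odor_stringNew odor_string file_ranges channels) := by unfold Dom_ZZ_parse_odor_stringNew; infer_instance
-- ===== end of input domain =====

-- B replaces A's per-channel rescans of the token list by a single grouping pass plus
-- dictionary lookups (objective: alternative algorithm); return values agree on Pre_.

-- ===== PORT A =====
-- literal transliteration of A: split, then for each channel scan enumerate(info),
-- collecting file_ranges[idx] for matching tokens.
-- split? is exact here: the separator "_" is non-empty, so it never returns none.
-- pyGetD is exact under Pre_ (the matched index is always in range of file_ranges).
def ZZ_parse_odor_stringNew (odor_string : String) (file_ranges : List Int) (channels : List String) : List (String × List Int) :=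
  let info := (PySem.Str.split? odor_string "_").getD []
  (channels.foldl (fun odor_file channel =>
      let file_idx := (PySem.List.enumerate info).foldl
        (fun acc p => if p.2 == "(" ++ channel ++ ")" then acc ++ [PySem.List.pyGetD file_ranges p.1 0] else acc) []
      odor_file.insert channel file_idx)
    (PySem.Dict.empty)).items

-- ===== PORT B =====
-- literal transliteration of B: pair tokens with files (zip), keep the parenthesized
-- ones, group into a dict in one pass, then emit the requested channels by lookup.
def ZZ_parse_odor_stringNew_alt (odor_string : String) (file_ranges : List Int) (channels : List String) : List (String × List Int) :=
  let info := (PySem.Str.split? odor_string "_").getD []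
  let pairs := ((info.zip file_ranges).filter
      (fun p => PySem.Str.startswith p.1 "(" && PySem.Str.endswith p.1 ")")).map
      (fun p => (PySem.Str.slice p.1 (some 1) (some (-1)), p.2))
  let groups := pairs.foldl (fun d p => d.modify p.1 [] (· ++ [p.2])) PySem.Dict.empty
  (channels.foldl (fun out c => out.insert c (groups.getD c [])) PySem.Dict.empty).items

-- ===== PRECONDITION & SPEC =====
-- Pre_ excludes exactly the inputs where A raises IndexError: a token '(c)' for a
-- requested channel c sitting at a position with no corresponding entry in file_ranges.
def Pre_ZZ_parse_odor_stringNew (odor_string : String) (file_ranges : List Int) (channels : List String) : Prop :=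
  ∀ c ∈ channels, ∀ i < ((PySem.Str.split? odor_string "_").getD []).length,
    ((PySem.Str.split? odor_string "_").getD [])[i]? = some ("(" ++ c ++ ")") → i < file_ranges.length
instance (odor_string : String) (file_ranges : List Int) (channels : List String) : Decidable (Pre_ZZ_parse_odor_stringNew odor_string file_ranges channels) := by unfold Pre_ZZ_parse_odor_stringNew; infer_instance

def pvWitness_ZZ_parse_odor_stringNew : String × List Int × List String := ("(A0)_(B0)_(B0)_(A1)", [2, 3, 5, 6], ["B0", "A1"])

def Spec_ZZ_parse_odor_stringNew (odor_string : String) (file_ranges : List Int) (channels : List String) (out : List (String × List Int)) : Prop := out = ZZ_parse_odor_stringNew_alt odor_string file_ranges channels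
instance (odor_string : String) (file_ranges : List Int) (channels : List String) (out : List (String × List Int)) : Decidable (Spec_ZZ_parse_odor_stringNew odor_string file_ranges channels out) := by unfold Spec_ZZ_parse_odor_stringNew; infer_instance

-- ===== CLAIM (what is proved, stated in full; the proofs are below) =====
def Claim_equal_ZZ_parse_odor_stringNew : Prop := ∀ (odor_string : String) (file_ranges : List Int) (channels : List String), Dom_ZZ_parse_odor_stringNew odor_string file_ranges channels → Pre_ZZ_parse_odor_stringNew odor_string file_ranges channels → Spec_ZZ_parse_odor_stringNew odor_string file_ranges channels (ZZ_parse_odor_stringNew odor_string file_ranges channels)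
-- ===== LEMMAS AND PROOFS =====

-- xs[1:-1] on a non-empty list is tail+dropLast
theorem pv_slice_mid (a : Char) (t : List Char) :
    PySem.List.slice (a :: t) (some 1) (some (-1)) = t.dropLast := by
  have h : ¬ ((t.length : Int) < 0) := by omega
  simp [PySem.List.slice, PySem.List.clampIdx, List.dropLast_eq_take, h]

-- a token equals '(' ++ c ++ ')' iff it is parenthesized and its middle is c (char-list form)
theorem pv_tok_chars (l m : List Char) :
    (PySem.Chars.startswith l ['('] = true ∧ PySem.Chars.endswith l [')'] = true ∧
      PySem.List.slice l (some 1) (some (-1)) = m) ↔ l = '(' :: (m ++ [')']) := by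
  rcases l with _ | ⟨a, t⟩
  · simp [PySem.Chars.startswith]
  · simp only [PySem.Chars.startswith_iff, PySem.Chars.endswith_iff, pv_slice_mid,
      List.cons_prefix_cons]
    constructor
    · rintro ⟨⟨ha, -⟩, ⟨pre, hpre⟩, hm⟩
      subst ha
      rcases pre with _ | ⟨b, pre'⟩
      · simp at hpre
      · simp only [List.cons_append, List.cons.injEq] at hpre
        obtain ⟨rfl, rfl⟩ := hpre
        simp at hm
        simp [hm]
    · rintro h
      simp only [List.cons.injEq] at h
      obtain ⟨rfl, rfl⟩ := h
      exact ⟨⟨rfl, List.nil_prefix⟩, ⟨'(' :: m, by simp⟩, by simp⟩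

-- the same fact as a Bool equation on Strings, in the shape the two filters use
theorem pv_tok_str (t c : String) :
    ((PySem.Str.slice t (some 1) (some (-1)) == c) &&
      (PySem.Str.startswith t "(" && PySem.Str.endswith t ")")) = (t == "(" ++ c ++ ")") := by
  rw [Bool.eq_iff_iff]
  simp only [Bool.and_eq_true, beq_iff_eq]
  rw [← String.toList_inj, ← String.toList_inj (s₁ := t)]
  have hb := pv_tok_chars t.toList c.toList
  simp only [PySem.Str.startswith_eq, PySem.Str.endswith_eq, PySem.Str.toList_slice,
    PySem.Chars.slice_eq_listSlice] at *
  constructor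
  · rintro ⟨hm, hs, he⟩
    have := hb.mp ⟨by simpa using hs, by simpa using he, hm⟩
    simpa using this
  · intro h
    have h' : t.toList = '(' :: (c.toList ++ [')']) := by simpa using h
    obtain ⟨hs, he, hm⟩ := hb.mpr h'
    exact ⟨hm, by simpa using hs, by simpa using he⟩

-- A's inner scan over enumerate(info) equals the zip-based selection, given that every
-- matching token's index is in range of F
theorem pv_enum_zip (pc : String) (F : List Int) :
    ∀ (info : List String) (s : Nat),
    (∀ i : Nat, i < info.length → info[i]? = some pc → s + i < F.length) →
    ((PySem.List.enumerate info (s : Int)).filter (fun p => p.2 == pc)).map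
        (fun p => PySem.List.pyGetD F p.1 0)
    = ((info.zip (F.drop s)).filter (fun p => p.1 == pc)).map (fun p => p.2) := by
  intro info
  induction info with
  | nil => intro s h; simp [PySem.List.enumerate]
  | cons t rest ih =>
    intro s h
    have hrec : ∀ i : Nat, i < rest.length → rest[i]? = some pc → (s + 1) + i < F.length := by
      intro i hi hv
      have := h (i + 1) (by simpa using Nat.add_lt_add_right hi 1) (by simpa using hv)
      omega
    have hcast : ((s : Int) + 1) = ((s + 1 : Nat) : Int) := by push_cast; ring
    rw [PySem.List.enumerate_cons, hcast]
    by_cases htc : t = pc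
    · subst htc
      have hs : s < F.length := h 0 (by simp) (by simp)
      rw [List.drop_eq_getElem_cons hs, List.zip_cons_cons]
      simp only [List.filter_cons, beq_self_eq_true, if_pos, List.map_cons]
      rw [ih (s + 1) hrec]
      congr 1
      simp [PySem.List.pyGetD_natCast, List.getD_eq_getElem?_getD, hs]
    · have htc' : (t == pc) = false := by simp [htc]
      rcases hd : F.drop s with _ | ⟨y, ys⟩
      · have hd' : F.drop (s + 1) = [] := by rw [← List.tail_drop, hd]; rfl
        simp only [List.zip_nil_right, List.filter_cons, htc', Bool.false_eq_true, if_false,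
          List.filter_nil, List.map_nil]
        rw [ih (s + 1) hrec, hd']
        simp
      · have hd' : F.drop (s + 1) = ys := by rw [← List.tail_drop, hd]; rfl
        rw [List.zip_cons_cons]
        simp only [List.filter_cons, htc', Bool.false_eq_true, if_false]
        rw [ih (s + 1) hrec, hd']

theorem pv_getD_empty (c : String) :
    (PySem.Dict.empty (κ := String) (ν := List Int)).getD c [] = [] := by
  simp [PySem.Dict.getD, PySem.Dict.empty, PySem.Dict.get?]

-- B's dict lookup for channel c equals A's inner scan for channel c
theorem pv_value_eq (info : List String) (file_ranges : List Int) (c : String)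
    (h : ∀ i : Nat, i < info.length → info[i]? = some ("(" ++ c ++ ")") → i < file_ranges.length) :
    ((((info.zip file_ranges).filter
        (fun p => PySem.Str.startswith p.1 "(" && PySem.Str.endswith p.1 ")")).map
        (fun p => (PySem.Str.slice p.1 (some 1) (some (-1)), p.2))).foldl
        (fun d p => d.modify p.1 [] (· ++ [p.2])) PySem.Dict.empty).getD c []
    = (PySem.List.enumerate info).foldl
        (fun acc p => if p.2 == "(" ++ c ++ ")" then acc ++ [PySem.List.pyGetD file_ranges p.1 0] else acc) [] := by
  rw [PySem.Dict.getD_foldl_modify_append, pv_getD_empty, List.nil_append]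
  rw [show (fun (acc : List Int) (p : Int × String) => if (p.2 == "(" ++ c ++ ")") = true then acc ++ [PySem.List.pyGetD file_ranges p.1 0] else acc) = (fun acc p => if (fun (q : Int × String) => q.2 == "(" ++ c ++ ")") p = true then acc ++ [(fun (q : Int × String) => PySem.List.pyGetD file_ranges q.1 0) p] else acc) from rfl,
    PySem.List.foldl_append_if, List.nil_append]
  have h0 : ∀ i : Nat, i < info.length → info[i]? = some ("(" ++ c ++ ")") →
      (0 : Nat) + i < file_ranges.length := by intro i hi hv; simpa using h i hi hv
  have := pv_enum_zip ("(" ++ c ++ ")") file_ranges info 0 h0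
  simp only [Nat.cast_zero, List.drop_zero] at this
  rw [this, List.filter_map, List.map_map]
  congr 1
  rw [List.filter_filter]
  apply List.filter_congr
  intro p _
  exact pv_tok_str p.1 c

theorem ZZ_parse_odor_stringNew_spec : Claim_equal_ZZ_parse_odor_stringNew := by
  intro odor_string file_ranges channels _ hpre
  unfold Spec_ZZ_parse_odor_stringNew ZZ_parse_odor_stringNew ZZ_parse_odor_stringNew_alt
  simp only []
  congr 1
  apply PySem.List.foldl_congr_mem
  intro acc c hc
  congr 1
  exact (pv_value_eq _ file_ranges c (fun i hi hv => hpre c hc i hi hv)).symm
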